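-- pv_equiv track=rewrite | github.com/N-n-0/eiazis | lab1/test1.py | mark_regions
-- ===== SOURCE A (Python) =====
-- a = 'C1'
--
-- b = 'C2'
--
-- v = 'D7'
--
-- g = 'C7'
--
-- d = 'C4'
--
-- e = 'C5'
--
-- zh = 'D6'
--
-- z = 'DA'
--
-- i_ = 'CA'
--
-- k = 'CB'
--
-- l = 'CC'
--
-- m = 'CD'
--
-- n = 'CE'
--
-- o = 'CF'
--
-- p = 'D0'
--
-- r = 'D2'
--
-- s = 'D3'
--
-- t = 'D4'
--
-- u = 'D5'
--
-- f = 'C6'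
--
-- kh = 'C8'
--
-- ts = 'C3'
--
-- ch = 'DE'
--
-- sh = 'DB'
--
-- shch = 'DD'
--
-- quote = 'DF'
--
-- y = 'D9'
--
-- apostrophe = 'D8'
--
-- e_ = 'DC'
--
-- iu = 'C0'
--
-- ia = 'D1'
--
-- def mark_regions(word):
--     pV = len(word)
--     p2 = len(word)
--
--     i = 0
--     while i < len(word):
--         if word[i:i + 2] in [a, b, v, g, d, e, zh, z, i, i_, k, l, m, n, o, p, r, s, t, u, f, kh, ts, ch, sh, shch,
--                              quote, y, apostrophe, e_, iu, ia]:
--             pV = i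
--             i += 2
--             while i < len(word):
--                 if word[i:i + 2] not in [a, b, v, g, d, e, zh, z, i, i_, k, l, m, n, o, p, r, s, t, u, f, kh, ts, ch,
--                                          sh, shch, quote, y, apostrophe, e_, iu, ia]:
--                     p2 = i
--                     break
--                 i += 2
--         i += 2
--
--     return pV, p2
-- ===== SOURCE B (Python) =====
-- _S = {'C1', 'C2', 'D7', 'C7', 'C4', 'C5', 'D6', 'DA', 'CA', 'CB', 'CC', 'CD',
--       'CE', 'CF', 'D0', 'D2', 'D3', 'D4', 'D5', 'C6', 'C8', 'C3', 'DE', 'DB',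
--       'DD', 'DF', 'D9', 'D8', 'DC', 'C0', 'D1'}
--
--
-- def mark_regions(word):
--     n = len(word)
--     # per-chunk membership table, then edge detection: last rising edge -> pV,
--     # last falling edge -> p2 (defaults n when no such edge exists)
--     flags = [word[2 * j:2 * j + 2] in _S for j in range((n + 1) // 2)]
--     pairs = list(zip([False] + flags, flags))
--     starts = [2 * j for j, (prev, f) in enumerate(pairs) if f and not prev]
--     falls = [2 * j for j, (prev, f) in enumerate(pairs) if not f and prev]
--     pV = starts[-1] if starts else n
--     p2 = falls[-1] if falls else n
--     return pV, p2
-- ===== Notes on version B (the rewrite author's own statement) =====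
-- stated objective: simpler
-- what changed: A's nested while-loops with break are replaced by building a per-chunk membership table and edge detection: pV is the last rising edge and p2 the last falling edge of the table (defaulting to len(word)).
import Mathlib
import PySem

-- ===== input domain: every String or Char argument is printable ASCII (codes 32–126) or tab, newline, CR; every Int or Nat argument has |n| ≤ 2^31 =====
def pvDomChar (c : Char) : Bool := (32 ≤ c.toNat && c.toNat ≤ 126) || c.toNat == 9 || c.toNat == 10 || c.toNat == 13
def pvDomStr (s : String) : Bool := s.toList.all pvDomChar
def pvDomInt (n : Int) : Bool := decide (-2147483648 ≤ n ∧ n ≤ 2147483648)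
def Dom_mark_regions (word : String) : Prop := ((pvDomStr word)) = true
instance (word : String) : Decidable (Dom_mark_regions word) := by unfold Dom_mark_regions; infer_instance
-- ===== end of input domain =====

-- B replaces A's nested while-loops by a per-chunk membership table plus edge detection
-- (last rising edge = pV, last falling edge = p2); objective: simpler, not faster.

-- ===== PORT A =====
-- the 31 two-character strings of the Python membership list (its 32nd element, the
-- integer loop variable `i`, can never equal a string slice and is inert, so it is omitted)
def pvS : List String :=
  ["C1", "C2", "D7", "C7", "C4", "C5", "D6", "DA", "CA", "CB", "CC", "CD", "CE", "CF",
   "D0", "D2", "D3", "D4", "D5", "C6", "C8", "C3", "DE", "DB", "DD", "DF", "D9", "D8",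
   "DC", "C0", "D1"]

-- word[i:i+2] for a Nat index i (A's/B's indices are 0,2,4,…, always ≥ 0, so this is exact)
def pvChunk (cs : List Char) (i : Nat) : String :=
  String.ofList (PySem.List.slice cs (some (i : Int)) (some ((i : Int) + 2)))

-- A's inner while-loop: returns the final i together with p2 (break sets p2 = i).
-- fuel only makes the recursion structural; cs.length + 1 fuel always suffices
-- (i grows by 2 each step and the loop runs only while i < cs.length), so the
-- fuel = 0 branch is never reached from mark_regions.
def pvInner (cs : List Char) (fuel : Nat) (i : Nat) (p2 : Int) : Nat × Int :=
  match fuel with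
  | 0 => (i, p2)
  | fuel + 1 =>
    if i < cs.length then
      if pvChunk cs i ∉ pvS then (i, (i : Int))
      else pvInner cs fuel (i + 2) p2
    else (i, p2)

-- A's outer while-loop (same fuel discipline)
def pvOuter (cs : List Char) (fuel : Nat) (i : Nat) (pV p2 : Int) : Int × Int :=
  match fuel with
  | 0 => (pV, p2)
  | fuel + 1 =>
    if i < cs.length then
      if pvChunk cs i ∈ pvS then
        pvOuter cs fuel ((pvInner cs (cs.length + 1) (i + 2) p2).1 + 2) (i : Int)
          (pvInner cs (cs.length + 1) (i + 2) p2).2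
      else pvOuter cs fuel (i + 2) pV p2
    else (pV, p2)

def mark_regions (word : String) : Int × Int :=
  pvOuter word.toList (word.toList.length + 1) 0 (PySem.Str.len word) (PySem.Str.len word)

-- ===== PORT B =====
def mark_regions_alt (word : String) : Int × Int :=
  let cs := word.toList
  let n := PySem.Str.len word
  let flags := (List.range ((cs.length + 1) / 2)).map (fun j => decide (pvChunk cs (2 * j) ∈ pvS))
  let pairs := List.zip (false :: flags) flags
  let enum := PySem.List.enumerate pairs 0
  let starts := (enum.filter (fun x => x.2.2 && !x.2.1)).map (fun x => 2 * x.1)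
  let falls := (enum.filter (fun x => !x.2.2 && x.2.1)).map (fun x => 2 * x.1)
  ((starts.getLast?).getD n, (falls.getLast?).getD n)

-- ===== PRECONDITION & SPEC =====
def Spec_mark_regions (word : String) (out : Int × Int) : Prop := out = mark_regions_alt word
instance (word : String) (out : Int × Int) : Decidable (Spec_mark_regions word out) := by unfold Spec_mark_regions; infer_instance

-- ===== CLAIM (what is proved, stated in full; the proofs are below) =====
def Claim_equal_mark_regions : Prop := ∀ (word : String), Dom_mark_regions word → Spec_mark_regions word (mark_regions word)

-- ===== LEMMAS AND PROOFS =====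

-- chunk-membership flags of cs from chunk j on
def chunkFlags (cs : List Char) (j : Nat) : List Bool :=
  if 2 * j < cs.length then decide (pvChunk cs (2 * j) ∈ pvS) :: chunkFlags cs (j + 1) else []
  termination_by cs.length - 2 * j

-- A's loops rephrased on the flag list
def inF : List Bool → Nat → Int → (List Bool × Nat × Int)
  | [], j, p2 => ([], j, p2)
  | f :: rest, j, p2 => if f then inF rest (j + 1) p2 else (rest, j + 1, 2 * (j : Int))

theorem inF_len (l : List Bool) (j : Nat) (p2 : Int) : (inF l j p2).1.length ≤ l.length := by
  fun_induction inF l j p2 <;> simp_all <;> omega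

def outF (l : List Bool) (j : Nat) (pV p2 : Int) : Int × Int :=
  match l with
  | [] => (pV, p2)
  | f :: rest =>
    if f then
      outF (inF rest (j + 1) p2).1 (inF rest (j + 1) p2).2.1 (2 * (j : Int)) (inF rest (j + 1) p2).2.2
    else outF rest (j + 1) pV p2
  termination_by l.length
  decreasing_by
  · have := inF_len rest (j + 1) p2; simp; omega
  · simp

def contF (l : List Bool) (j : Nat) (pV p2 : Int) : Int × Int :=
  outF (inF l j p2).1 (inF l j p2).2.1 pV (inF l j p2).2.2

-- positions (as Python indices 2*j) of rising / falling edges of the flag list, given the previous flag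
def risesF (prev : Bool) : List Bool → Nat → List Int
  | [], _ => []
  | f :: rest, j => (if f && !prev then [2 * (j : Int)] else []) ++ risesF f rest (j + 1)

def fallsF (prev : Bool) : List Bool → Nat → List Int
  | [], _ => []
  | f :: rest, j => (if !f && prev then [2 * (j : Int)] else []) ++ fallsF f rest (j + 1)

theorem lastD_cons (l : List Int) (x d : Int) : ((x :: l).getLast?).getD d = (l.getLast?).getD x := by
  induction l generalizing x with
  | nil => simp
  | cons y ys ih =>
    rw [List.getLast?_cons_cons]
    cases h : (y :: ys).getLast? with
    | none => simp at h
    | some v => simp [h]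

theorem outF_nil (j : Nat) (pV p2 : Int) : outF [] j pV p2 = (pV, p2) := by rw [outF]

theorem outF_cons (f : Bool) (rest : List Bool) (j : Nat) (pV p2 : Int) :
    outF (f :: rest) j pV p2
      = if f then contF rest (j + 1) (2 * (j : Int)) p2 else outF rest (j + 1) pV p2 := by
  rw [outF]; rfl

theorem contF_cons (f : Bool) (rest : List Bool) (j : Nat) (pV p2 : Int) :
    contF (f :: rest) j pV p2
      = if f then contF rest (j + 1) pV p2 else outF rest (j + 1) pV (2 * (j : Int)) := by
  cases f <;> simp [contF, inF]

-- outF/contF compute the last rise (default pV) and last fall (default p2)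
theorem outF_contF_eq (l : List Bool) : ∀ (j : Nat) (pV p2 : Int),
    outF l j pV p2 = (((risesF false l j).getLast?).getD pV, ((fallsF false l j).getLast?).getD p2)
    ∧ contF l j pV p2 = (((risesF true l j).getLast?).getD pV, ((fallsF true l j).getLast?).getD p2) := by
  induction l with
  | nil => intro j pV p2; simp [outF_nil, contF, inF, risesF, fallsF]
  | cons f rest ih =>
    intro j pV p2
    cases f with
    | true =>
      constructor
      · rw [outF_cons, if_pos rfl, (ih (j + 1) (2 * (j : Int)) p2).2]
        simp [risesF, fallsF, lastD_cons]
      · rw [contF_cons, if_pos rfl, (ih (j + 1) pV p2).2]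
        simp [risesF, fallsF]
    | false =>
      constructor
      · rw [outF_cons, if_neg (by simp), (ih (j + 1) pV p2).1]
        simp [risesF, fallsF]
      · rw [contF_cons, if_neg (by simp), (ih (j + 1) pV (2 * (j : Int))).1]
        simp [risesF, fallsF, lastD_cons]

theorem pvOuter_stop (cs : List Char) (f i : Nat) (pV p2 : Int) (h : ¬ i < cs.length) :
    pvOuter cs f i pV p2 = (pV, p2) := by cases f <;> simp [pvOuter, h]

theorem pvInner_stop (cs : List Char) (g i : Nat) (p2 : Int) (h : ¬ i < cs.length) :
    pvInner cs g i p2 = (i, p2) := by cases g <;> simp [pvInner, h]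

theorem cast_two_mul (j : Nat) : ((2 * j : Nat) : Int) = 2 * (j : Int) := by push_cast; ring

-- the concrete loops compute outF/contF of the flag list (for any sufficient fuel)
theorem conc (cs : List Char) : ∀ (n j : Nat) (pV p2 : Int) (f g : Nat),
    cs.length ≤ 2 * j + n → cs.length ≤ 2 * j + 2 * f → cs.length ≤ 2 * j + 2 * g →
    pvOuter cs f (2 * j) pV p2 = outF (chunkFlags cs j) j pV p2
    ∧ pvOuter cs f ((pvInner cs g (2 * j) p2).1 + 2) pV (pvInner cs g (2 * j) p2).2
      = contF (chunkFlags cs j) j pV p2 := by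
  intro n
  induction n with
  | zero =>
    intro j pV p2 f g h hf hg
    have hj : ¬ 2 * j < cs.length := by omega
    rw [chunkFlags, if_neg hj, pvInner_stop cs _ _ _ hj]
    constructor
    · rw [pvOuter_stop cs _ _ _ _ hj, outF_nil]
    · show pvOuter cs f (2 * j + 2) pV p2 = _
      rw [pvOuter_stop cs _ _ _ _ (by omega)]
      simp [contF, inF, outF_nil]
  | succ n ihn =>
    intro j pV p2 f g h hf hg
    by_cases hj : 2 * j < cs.length
    · obtain ⟨f', rfl⟩ : ∃ f', f = f' + 1 := ⟨f - 1, by omega⟩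
      obtain ⟨g', rfl⟩ : ∃ g', g = g' + 1 := ⟨g - 1, by omega⟩
      rw [chunkFlags, if_pos hj]
      have h2 : 2 * (j + 1) = 2 * j + 2 := by omega
      by_cases hm : pvChunk cs (2 * j) ∈ pvS
      · have hd : decide (pvChunk cs (2 * j) ∈ pvS) = true := by simp [hm]
        rw [hd]
        have hA : pvOuter cs (f' + 1) (2 * j) pV p2
            = pvOuter cs f' ((pvInner cs (cs.length + 1) (2 * j + 2) p2).1 + 2) ((2 * j : Nat) : Int)
                (pvInner cs (cs.length + 1) (2 * j + 2) p2).2 := by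
          simp [pvOuter, hj, hm]
        have hI : pvInner cs (g' + 1) (2 * j) p2 = pvInner cs g' (2 * j + 2) p2 := by
          simp [pvInner, hj, hm]
        constructor
        · have := (ihn (j + 1) ((2 * j : Nat) : Int) p2 f' (cs.length + 1)
            (by omega) (by omega) (by omega)).2
          rw [h2] at this
          rw [hA, this, outF_cons, if_pos rfl, cast_two_mul]
        · have := (ihn (j + 1) pV p2 (f' + 1) g' (by omega) (by omega) (by omega)).2
          rw [h2] at this
          rw [hI, this, contF_cons, if_pos rfl]
      · have hd : decide (pvChunk cs (2 * j) ∈ pvS) = false := by simp [hm]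
        rw [hd]
        have hA : pvOuter cs (f' + 1) (2 * j) pV p2 = pvOuter cs f' (2 * j + 2) pV p2 := by
          simp [pvOuter, hj, hm]
        have hI : pvInner cs (g' + 1) (2 * j) p2 = (2 * j, ((2 * j : Nat) : Int)) := by
          simp [pvInner, hj, hm]
        constructor
        · have := (ihn (j + 1) pV p2 f' (g' + 1) (by omega) (by omega) (by omega)).1
          rw [h2] at this
          rw [hA, this, outF_cons, if_neg (by simp)]
        · rw [hI]
          show pvOuter cs (f' + 1) (2 * j + 2) pV ((2 * j : Nat) : Int) = _
          have := (ihn (j + 1) pV ((2 * j : Nat) : Int) (f' + 1) g' (by omega) (by omega) (by omega)).1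
          rw [h2] at this
          rw [this, contF_cons, if_neg (by simp), cast_two_mul]
    · rw [chunkFlags, if_neg hj, pvInner_stop cs _ _ _ hj]
      constructor
      · rw [pvOuter_stop cs _ _ _ _ hj, outF_nil]
      · show pvOuter cs f (2 * j + 2) pV p2 = _
        rw [pvOuter_stop cs _ _ _ _ (by omega)]
        simp [contF, inF, outF_nil]

-- the flag list as B builds it
theorem chunkFlags_eq (cs : List Char) : ∀ (n j : Nat), cs.length ≤ 2 * j + n →
    chunkFlags cs j
      = (List.range' j ((cs.length + 1) / 2 - j)).map (fun k => decide (pvChunk cs (2 * k) ∈ pvS)) := by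
  intro n
  induction n with
  | zero =>
    intro j h
    have hj : ¬ 2 * j < cs.length := by omega
    have hz : (cs.length + 1) / 2 - j = 0 := by omega
    rw [chunkFlags, if_neg hj, hz]; simp
  | succ n ihn =>
    intro j h
    by_cases hj : 2 * j < cs.length
    · have hm : (cs.length + 1) / 2 - j = ((cs.length + 1) / 2 - (j + 1)) + 1 := by omega
      rw [chunkFlags, if_pos hj, hm, List.range'_succ, List.map_cons, ihn (j + 1) (by omega)]
    · have hz : (cs.length + 1) / 2 - j = 0 := by omega
      rw [chunkFlags, if_neg hj, hz]; simp

-- B's filtered enumerations are exactly the rise / fall position lists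
theorem enum_rises (l : List Bool) : ∀ (prev : Bool) (j : Nat),
    ((PySem.List.enumerate (List.zip (prev :: l) l) (j : Int)).filter
        (fun x => x.2.2 && !x.2.1)).map (fun x => 2 * x.1) = risesF prev l j := by
  induction l with
  | nil => intro prev j; simp [PySem.List.enumerate_nil, risesF]
  | cons f rest ih =>
    intro prev j
    rw [List.zip_cons_cons, PySem.List.enumerate_cons]
    have hc : ((j : Int) + 1) = ((j + 1 : Nat) : Int) := by push_cast; ring
    cases f <;> cases prev <;>
      (simp only [List.filter_cons, List.map_cons, risesF, Bool.not_true, Bool.not_false,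
         Bool.and_true, Bool.and_false, Bool.true_and, Bool.false_and, if_true, if_false,
         List.nil_append, List.singleton_append, List.cons.injEq, true_and] <;>
       (rw [hc]; exact ih _ _))

theorem enum_falls (l : List Bool) : ∀ (prev : Bool) (j : Nat),
    ((PySem.List.enumerate (List.zip (prev :: l) l) (j : Int)).filter
        (fun x => !x.2.2 && x.2.1)).map (fun x => 2 * x.1) = fallsF prev l j := by
  induction l with
  | nil => intro prev j; simp [PySem.List.enumerate_nil, fallsF]
  | cons f rest ih =>
    intro prev j
    rw [List.zip_cons_cons, PySem.List.enumerate_cons]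
    have hc : ((j : Int) + 1) = ((j + 1 : Nat) : Int) := by push_cast; ring
    cases f <;> cases prev <;>
      (simp only [List.filter_cons, List.map_cons, fallsF, Bool.not_true, Bool.not_false,
         Bool.and_true, Bool.and_false, Bool.true_and, Bool.false_and, if_true, if_false,
         List.nil_append, List.singleton_append, List.cons.injEq, true_and] <;>
       (rw [hc]; exact ih _ _))

-- ===== VERDICT (by name: the statement is the Claim_ definition above) =====
theorem mark_regions_spec : Claim_equal_mark_regions := by
  intro word _
  unfold Spec_mark_regions mark_regions mark_regions_alt
  set cs := word.toList with hcs
  set n := PySem.Str.len word with hn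
  have h0 : (0 : Nat) = 2 * 0 := rfl
  rw [h0, (conc cs cs.length 0 n n (cs.length + 1) (cs.length + 1) (by omega) (by omega) (by omega)).1, (outF_contF_eq (chunkFlags cs 0) 0 n n).1]
  have hflags : (List.range ((cs.length + 1) / 2)).map (fun j => decide (pvChunk cs (2 * j) ∈ pvS))
      = chunkFlags cs 0 := by
    rw [chunkFlags_eq cs cs.length 0 (by omega), List.range_eq_range']; simp
  simp only [hflags]
  have hz : (0 : Int) = ((0 : Nat) : Int) := rfl
  rw [hz, enum_rises (chunkFlags cs 0) false 0, enum_falls (chunkFlags cs 0) false 0]
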